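-- pv_equiv track=rewrite | github.com/mr-mateusz/advent-of-code-2024 | day_12/solution.py | count_spans
-- ===== SOURCE A (Python) =====
-- def count_spans(values: list) -> int:
--     if not values:
--         return 0
--
--     prev = None
--     spans = 1
--     for v in sorted(values):
--         if prev is None:
--             prev = v
--             continue
--         if prev + 1 != v:
--             spans += 1
--         prev = v
--     return spans
-- ===== SOURCE B (Python) =====
-- def count_spans(values: list) -> int:
--     s = set(values)
--     return (len(values) - len(s)) + sum(1 for v in s if v - 1 not in s)
-- ===== Notes on version B (the rewrite author's own statement) =====
-- stated objective: faster
-- what changed: Replaces sort-then-scan counting of adjacent breaks with a set-based closed form: spans = (number of distinct values whose predecessor is absent) + (number of duplicates, len - distinct).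
import Mathlib
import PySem

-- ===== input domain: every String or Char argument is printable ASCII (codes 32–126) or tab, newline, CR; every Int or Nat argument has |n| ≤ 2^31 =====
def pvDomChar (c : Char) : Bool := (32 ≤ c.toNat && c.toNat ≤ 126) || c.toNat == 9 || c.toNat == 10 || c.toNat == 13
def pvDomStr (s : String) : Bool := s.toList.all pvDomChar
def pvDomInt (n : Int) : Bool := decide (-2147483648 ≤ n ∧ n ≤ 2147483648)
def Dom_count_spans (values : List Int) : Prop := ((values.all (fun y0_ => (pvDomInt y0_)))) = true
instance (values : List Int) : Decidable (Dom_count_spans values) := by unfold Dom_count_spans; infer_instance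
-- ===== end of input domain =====

-- B replaces A's sort-then-scan with an O(n) set-based closed form (distinct values
-- lacking a predecessor, plus the duplicate count); objective: faster.

-- ===== PORT A =====
def count_spans (values : List Int) : Int :=
  if values = [] then 0
  else
    ((PySem.List.sorted values (fun x => x) false).foldl
      (fun (st : Option Int × Int) v =>
        match st.1 with
        | none => (some v, st.2)
        | some prev => if prev + 1 ≠ v then (some v, st.2 + 1) else (some v, st.2))
      (none, 1)).2

-- ===== PORT B =====
def count_spans_alt (values : List Int) : Int :=
  let s : PySem.Set Int := PySem.Set.ofList values
  ((values.length : Int) - (s.length : Int)) +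
    ((s.filter (fun v => !(PySem.Set.contains s (v - 1)))).length : Int)

-- ===== PRECONDITION & SPEC =====
def Spec_count_spans (values : List Int) (out : Int) : Prop := out = count_spans_alt values
instance (values : List Int) (out : Int) : Decidable (Spec_count_spans values out) := by unfold Spec_count_spans; infer_instance

-- ===== CLAIM (what is proved, stated in full; the proofs are below) =====
def Claim_equal_count_spans : Prop := ∀ (values : List Int), Dom_count_spans values → Spec_count_spans values (count_spans values)

-- ===== LEMMAS AND PROOFS =====

-- A's loop after the first iteration (prev set, spans accumulated)
def pvLoop : Int → Int → List Int → Int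
  | _, spans, [] => spans
  | prev, spans, v :: t => pvLoop v (if prev + 1 ≠ v then spans + 1 else spans) t

lemma pvFoldl_eq_loop (t : List Int) : ∀ (prev spans : Int),
    (t.foldl
      (fun (st : Option Int × Int) v =>
        match st.1 with
        | none => (some v, st.2)
        | some p => if p + 1 ≠ v then (some v, st.2 + 1) else (some v, st.2))
      (some prev, spans)).2 = pvLoop prev spans t := by
  induction t with
  | nil => intro prev spans; rfl
  | cons v t ih =>
      intro prev spans
      simp only [List.foldl, pvLoop]
      by_cases h : prev + 1 ≠ v
      · simp only [if_pos h]; exact ih v (spans + 1)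
      · simp only [if_neg h]; exact ih v spans

-- number of distinct values in l with no predecessor in l
def pvD (l : List Int) : Nat := (l.dedup.filter (fun v => !decide ((v - 1) ∈ l))).length

lemma pvFoldl_none (a : Int) (t : List Int) :
    ((a :: t).foldl
      (fun (st : Option Int × Int) v =>
        match st.1 with
        | none => (some v, st.2)
        | some p => if p + 1 ≠ v then (some v, st.2 + 1) else (some v, st.2))
      (none, 1)).2 = pvLoop a 1 t := by
  simp only [List.foldl_cons]
  exact pvFoldl_eq_loop t a 1

lemma pvFilter_drop_one (L : List Int) (q q' : Int → Bool) (b : Int) :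
    L.Nodup → b ∈ L → q' b = true → q b = false → (∀ v ∈ L, v ≠ b → q v = q' v) →
    (L.filter q').length = (L.filter q).length + 1 := by
  induction L with
  | nil => intro _ h; cases h
  | cons a T ih =>
      intro hnd hm hq' hq hagree
      rcases List.mem_cons.mp hm with rfl | hmT
      · have hTeq : T.filter q = T.filter q' := by
          apply List.filter_congr
          intro v hv
          exact hagree v (List.mem_cons_of_mem _ hv)
            (fun h => (List.nodup_cons.mp hnd).1 (h ▸ hv))
        simp [hq', hq, hTeq]
      · have hab : a ≠ b := fun h => (List.nodup_cons.mp hnd).1 (h ▸ hmT)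
        have hrec := ih (List.nodup_cons.mp hnd).2 hmT hq' hq
          (fun v hv hvb => hagree v (List.mem_cons_of_mem _ hv) hvb)
        have ha : q a = q' a := hagree a List.mem_cons_self hab
        by_cases hqa : q a = true <;>
          simp [hqa, ha ▸ hqa, hrec]

-- main invariant over the sorted list
lemma pvLoop_spec (t : List Int) : ∀ (a s : Int), (a :: t).Pairwise (· ≤ ·) →
    pvLoop a s t = s + (pvD (a :: t) : Int) - 1
      + ((a :: t).length : Int) - ((a :: t).dedup.length : Int) := by
  induction t with
  | nil =>
      intro a s _
      have : ¬ (a - 1 = a) := by omega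
      simp [pvLoop, pvD, this]
  | cons b t' ih =>
      intro a s hp
      have hpb : (b :: t').Pairwise (· ≤ ·) := hp.tail
      have hale : ∀ x ∈ b :: t', a ≤ x := fun x hx => (List.pairwise_cons.mp hp).1 x hx
      have hble : ∀ x ∈ t', b ≤ x := fun x hx => (List.pairwise_cons.mp hpb).1 x hx
      by_cases hab : a = b
      · -- duplicate head: break counted, distinct set unchanged
        subst hab
        have hne : a + 1 ≠ a := by omega
        have hmem : a ∈ a :: t' := List.mem_cons_self
        have hded : (a :: a :: t').dedup = (a :: t').dedup :=
          List.dedup_cons_of_mem hmem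
        have hDeq : pvD (a :: a :: t') = pvD (a :: t') := by
          unfold pvD
          rw [hded]
          apply congrArg
          apply List.filter_congr
          intro v _
          have : (v - 1 ∈ a :: a :: t') ↔ (v - 1 ∈ a :: t') := by simp
          simp [this]
        rw [pvLoop, if_pos hne, ih a (s + 1) hpb, hDeq, hded]
        simp; omega
      · have haltb : a < b := lt_of_le_of_ne (hale b List.mem_cons_self) hab
        have hanot : a ∉ b :: t' := by
          intro h
          rcases List.mem_cons.mp h with h | h
          · exact hab h
          · exact absurd (hble a h) (by omega)
        have hded : (a :: b :: t').dedup = a :: (b :: t').dedup :=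
          List.dedup_cons_of_notMem hanot
        have hpa : (!decide ((a - 1) ∈ a :: b :: t')) = true := by
          have : a - 1 ∉ a :: b :: t' := by
            intro h
            rcases List.mem_cons.mp h with h | h
            · omega
            · exact absurd (hale _ h) (by omega)
          simp [this]
        by_cases hb1 : b = a + 1
        · -- adjacent: no break; b loses its "no predecessor" status, a gains one
          subst hb1
          have hnb : ¬ (a + 1 ≠ a + 1) := by simp
          have hbmem : a + 1 ∈ ((a + 1) :: t').dedup := by
            simp [List.mem_dedup]
          have hdrop :
              (((a + 1) :: t').dedup.filter
                  (fun v => !decide ((v - 1) ∈ (a + 1) :: t'))).length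
              = (((a + 1) :: t').dedup.filter
                  (fun v => !decide ((v - 1) ∈ a :: (a + 1) :: t'))).length + 1 := by
            apply pvFilter_drop_one _ _ _ (a + 1) (List.nodup_dedup _) hbmem
            · have h0 : (a + 1 - 1 : Int) = a := by omega
              simp [h0, hanot]
            · have h0 : (a + 1 - 1 : Int) = a := by omega
              simp [h0]
            · intro v hv hvb
              have hvm : v ∈ (a + 1) :: t' := List.mem_dedup.mp hv
              have : (v - 1 ∈ a :: (a + 1) :: t') ↔ (v - 1 ∈ (a + 1) :: t') := by
                constructor
                · intro h
                  rcases List.mem_cons.mp h with h | h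
                  · exact absurd (by omega : v = a + 1) hvb
                  · exact h
                · intro h; exact List.mem_cons_of_mem _ h
              simp [this]
          have hDeq : pvD (a :: (a + 1) :: t') = pvD ((a + 1) :: t') := by
            unfold pvD
            rw [hded]
            simp only [List.filter_cons, hpa, if_true, List.length_cons]
            omega
          rw [pvLoop, if_neg hnb, ih (a + 1) s hpb, hDeq, hded]
          simp; omega
        · -- gap: break; predicates unchanged on the tail, a adds one distinct no-pred value
          have hnb : a + 1 ≠ b := fun h => hb1 h.symm
          have hsucnot : (a + 1) ∉ b :: t' := by
            intro h
            rcases List.mem_cons.mp h with h | h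
            · exact hnb h
            · exact absurd (hble _ h) (by omega)
          have hDeq : pvD (a :: b :: t') = pvD (b :: t') + 1 := by
            unfold pvD
            rw [hded]
            have hcg : (b :: t').dedup.filter (fun v => !decide ((v - 1) ∈ a :: b :: t'))
                = (b :: t').dedup.filter (fun v => !decide ((v - 1) ∈ b :: t')) := by
              apply List.filter_congr
              intro v hv
              have hvm : v ∈ b :: t' := List.mem_dedup.mp hv
              have : (v - 1 ∈ a :: b :: t') ↔ (v - 1 ∈ b :: t') := by
                constructor
                · intro h
                  rcases List.mem_cons.mp h with h | h
                  · have hv1 : v = a + 1 := by omega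
                    exact absurd (hv1 ▸ hvm) hsucnot
                  · exact h
                · intro h; exact List.mem_cons_of_mem _ h
              simp [this]
            simp only [List.filter_cons, hpa, if_true, List.length_cons, hcg]
          rw [pvLoop, if_pos hnb, ih b (s + 1) hpb, hDeq, hded]
          simp; omega

-- ===== VERDICT (by name: the statement is the Claim_ definition above) =====
theorem count_spans_spec : Claim_equal_count_spans := by
  intro values _
  unfold Spec_count_spans count_spans count_spans_alt
  by_cases hnil : values = []
  · subst hnil; rfl
  · rw [if_neg hnil]
    set l := PySem.List.sorted values (fun x => x) false with hl
    have hperm : l.Perm values := PySem.List.sorted_perm values (fun x => x) false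
    have hpw : l.Pairwise (· ≤ ·) := by
      simpa using PySem.List.sorted_pairwise values (fun x => x)
    have hlne : l ≠ [] := by
      intro h
      exact hnil (List.Perm.nil_eq (h ▸ hperm)).symm
    obtain ⟨a, t, hat⟩ := List.exists_cons_of_ne_nil hlne
    have hmv : ∀ x : Int, x ∈ values ↔ x ∈ l := fun x => (hperm.mem_iff).symm
    -- the set side, rephrased over l.dedup
    have hsetperm : (PySem.Set.ofList values).Perm l.dedup := by
      apply (List.perm_ext_iff_of_nodup (PySem.Set.nodup_ofList values)
        (List.nodup_dedup l)).mpr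
      intro x
      rw [PySem.Set.mem_ofList, List.mem_dedup]
      exact hmv x
    have hlen : (PySem.Set.ofList values).length = l.dedup.length :=
      hsetperm.length_eq
    have hfilt :
        ((PySem.Set.ofList values).filter
          (fun v => !(PySem.Set.contains (PySem.Set.ofList values) (v - 1)))).length
        = pvD l := by
      have h1 : (PySem.Set.ofList values).filter
            (fun v => !(PySem.Set.contains (PySem.Set.ofList values) (v - 1)))
          = (PySem.Set.ofList values).filter (fun v => !decide ((v - 1) ∈ l)) := by
        apply List.filter_congr
        intro v _
        have : PySem.Set.contains (PySem.Set.ofList values) (v - 1)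
            = decide ((v - 1) ∈ l) := by
          by_cases h : (v - 1) ∈ l
          · simp [h, PySem.Set.mem_ofList, hmv]
          · have : (v - 1) ∉ values := fun hc => h ((hmv _).mp hc)
            simp [h, PySem.Set.mem_ofList, this]
        rw [this]
      rw [h1]
      exact (hsetperm.filter _).length_eq
    rw [hat, pvFoldl_none, pvLoop_spec t a 1 (hat ▸ hpw)]
    show _ = (values.length : Int) - ((PySem.Set.ofList values).length : Int)
      + (((PySem.Set.ofList values).filter
          (fun v => !((PySem.Set.ofList values).contains (v - 1)))).length : Int)
    rw [hfilt, hlen, ← hat, hperm.length_eq]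
    omega
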